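-- pv_equiv track=rewrite | github.com/THU-KEG/OmniEvent | OpenEE/input_engineering/token_classification_processor.py | insert_marker
-- ===== SOURCE A (Python) =====
-- def insert_marker(text, type, trigger_position, argument_position, markers, whitespace=True):
--     markered_text = ""
--     for i, char in enumerate(text):
--         if i == trigger_position[0]:
--             markered_text += markers[type][0]
--             markered_text += " " if whitespace else ""
--         if i == argument_position[0]:
--             markered_text += markers["argument"][0]
--             markered_text += " " if whitespace else ""
--         markered_text += char
--         if i == trigger_position[1]-1:
--             markered_text += " " if whitespace else ""
--             markered_text += markers[type][1]
--         if i ==argument_position[1]-1: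
--             markered_text += " " if whitespace else ""
--             markered_text += markers["argument"][1]
--     return markered_text
-- ===== SOURCE B (Python) =====
-- def insert_marker(text, type, trigger_position, argument_position, markers, whitespace=True):
--     n = len(text)
--     sp = " " if whitespace else ""
--     t0, t1 = trigger_position
--     a0, a1 = argument_position
--     # gap-indexed insertion points: at gap g, close markers (for char g-1) precede
--     # open markers (for char g); trigger precedes argument within each kind
--     points = []
--     if 0 <= t1 - 1 < n:
--         points.append((t1, sp + markers[type][1]))
--     if 0 <= a1 - 1 < n:
--         points.append((a1, sp + markers["argument"][1]))
--     if 0 <= t0 < n: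
--         points.append((t0, markers[type][0] + sp))
--     if 0 <= a0 < n:
--         points.append((a0, markers["argument"][0] + sp))
--     parts = []
--     for g in range(n + 1):
--         for j, s in points:
--             if j == g:
--                 parts.append(s)
--         if g < n:
--             parts.append(text[g])
--     return "".join(parts)
-- ===== Notes on version B (the rewrite author's own statement) =====
-- stated objective: alternative
-- what changed: B replaces A's character-by-character scan that re-tests four position conditionals at every character by precomputing a list of at most four gap-indexed insertion points and then assembling the output in one pass over the gaps.
import Mathlib
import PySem

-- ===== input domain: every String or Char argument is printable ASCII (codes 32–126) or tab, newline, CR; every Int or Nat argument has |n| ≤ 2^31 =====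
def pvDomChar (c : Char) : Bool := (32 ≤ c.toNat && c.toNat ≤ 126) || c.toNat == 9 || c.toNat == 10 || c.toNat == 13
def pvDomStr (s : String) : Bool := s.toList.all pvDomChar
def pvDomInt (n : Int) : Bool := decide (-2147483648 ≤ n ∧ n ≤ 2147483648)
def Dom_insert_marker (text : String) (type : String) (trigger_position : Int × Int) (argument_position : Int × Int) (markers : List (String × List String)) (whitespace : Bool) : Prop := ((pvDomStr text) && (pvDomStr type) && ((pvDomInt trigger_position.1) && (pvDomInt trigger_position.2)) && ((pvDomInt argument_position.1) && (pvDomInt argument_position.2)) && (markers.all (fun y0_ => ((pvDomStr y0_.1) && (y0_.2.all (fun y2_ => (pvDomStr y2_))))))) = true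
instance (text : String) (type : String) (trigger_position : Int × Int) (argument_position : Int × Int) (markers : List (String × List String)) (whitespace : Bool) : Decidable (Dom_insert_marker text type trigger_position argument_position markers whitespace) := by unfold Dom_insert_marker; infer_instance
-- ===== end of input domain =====

-- B replaces A's char-by-char scan (four conditionals re-tested at every character) by a
-- precomputed list of at most four gap-indexed insertion points and a single assembly pass;
-- objective: alternative decomposition, same exact return value on Pre_.

-- markers[key][j] : total lookup helper (Pre_ guarantees the key/index exist where it is used)
def pvMark (markers : List (String × List String)) (k : String) (j : Nat) : List Char :=
  ((((PySem.Dict.mk markers).get? k).getD []).getD j "").toList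

-- ===== PORT A =====
-- loop body of A: two conditional open-marker appends, the char, two conditional close-marker appends
def pvStepA (t0 a0 t1 a1 : Int) (mt0 ma0 mt1 ma1 sp : List Char)
    (acc : List Char) (p : Int × Char) : List Char :=
  let acc := if p.1 = t0 then acc ++ mt0 ++ sp else acc
  let acc := if p.1 = a0 then acc ++ ma0 ++ sp else acc
  let acc := acc ++ [p.2]
  let acc := if p.1 = t1 - 1 then acc ++ sp ++ mt1 else acc
  if p.1 = a1 - 1 then acc ++ sp ++ ma1 else acc

def insert_marker (text : String) (type : String) (trigger_position : Int × Int) (argument_position : Int × Int) (markers : List (String × List String)) (whitespace : Bool) : String :=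
  String.mk ((PySem.List.enumerate text.toList).foldl
    (pvStepA trigger_position.1 argument_position.1 trigger_position.2 argument_position.2
      (pvMark markers type 0) (pvMark markers "argument" 0)
      (pvMark markers type 1) (pvMark markers "argument" 1)
      (if whitespace then [' '] else [])) [])

-- ===== PORT B =====
-- B's insertion points: (gap index, string); close markers listed before open markers
def pvPoints (t0 a0 t1 a1 : Int) (mt0 ma0 mt1 ma1 sp : List Char) (n : Int) :
    List (Int × List Char) :=
  (if 0 ≤ t1 - 1 ∧ t1 - 1 < n then [(t1, sp ++ mt1)] else []) ++
  (if 0 ≤ a1 - 1 ∧ a1 - 1 < n then [(a1, sp ++ ma1)] else []) ++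
  (if 0 ≤ t0 ∧ t0 < n then [(t0, mt0 ++ sp)] else []) ++
  (if 0 ≤ a0 ∧ a0 < n then [(a0, ma0 ++ sp)] else [])

-- B's loop body: emit all insertion points at gap g, then the char at g (if any)
def pvStepB (n : Int) (points : List (Int × List Char)) (cs : List Char)
    (parts : List Char) (g : Int) : List Char :=
  let parts := points.foldl (fun a p => if p.1 = g then a ++ p.2 else a) parts
  if g < n then parts ++ [PySem.List.pyGetD cs g ' '] else parts

def insert_marker_alt (text : String) (type : String) (trigger_position : Int × Int) (argument_position : Int × Int) (markers : List (String × List String)) (whitespace : Bool) : String :=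
  let cs := text.toList
  let n : Int := cs.length
  let points := pvPoints trigger_position.1 argument_position.1 trigger_position.2 argument_position.2
      (pvMark markers type 0) (pvMark markers "argument" 0)
      (pvMark markers type 1) (pvMark markers "argument" 1)
      (if whitespace then [' '] else []) n
  String.mk ((PySem.List.pyRange 0 (n + 1) 1).foldl (pvStepB n points cs) [])

-- ===== PRECONDITION & SPEC =====
-- Pre_ excludes exactly the inputs on which Python A raises KeyError/IndexError: a marker
-- lookup markers[type][j] / markers["argument"][j] that the in-range positions actually reach
-- must find its key with a long-enough list.
def Pre_insert_marker (text : String) (type : String) (trigger_position : Int × Int) (argument_position : Int × Int) (markers : List (String × List String)) (whitespace : Bool) : Prop :=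
  let n : Int := (text.toList.length : Int)
  let lenT := (((PySem.Dict.mk markers).get? type).getD []).length
  let lenA := (((PySem.Dict.mk markers).get? "argument").getD []).length
  ((0 ≤ trigger_position.1 ∧ trigger_position.1 < n) → 1 ≤ lenT) ∧
  ((0 ≤ trigger_position.2 - 1 ∧ trigger_position.2 - 1 < n) → 2 ≤ lenT) ∧
  ((0 ≤ argument_position.1 ∧ argument_position.1 < n) → 1 ≤ lenA) ∧
  ((0 ≤ argument_position.2 - 1 ∧ argument_position.2 - 1 < n) → 2 ≤ lenA)
instance (text : String) (type : String) (trigger_position : Int × Int) (argument_position : Int × Int) (markers : List (String × List String)) (whitespace : Bool) : Decidable (Pre_insert_marker text type trigger_position argument_position markers whitespace) := by unfold Pre_insert_marker; infer_instance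

def pvWitness_insert_marker : String × String × (Int × Int) × (Int × Int) × (List (String × List String)) × Bool :=
  ("he runs fast", "movement", (3, 4), (0, 2),
   [("movement", ["<t>", "</t>"]), ("argument", ["<a>", "</a>"])], true)

def Spec_insert_marker (text : String) (type : String) (trigger_position : Int × Int) (argument_position : Int × Int) (markers : List (String × List String)) (whitespace : Bool) (out : String) : Prop := out = insert_marker_alt text type trigger_position argument_position markers whitespace
instance (text : String) (type : String) (trigger_position : Int × Int) (argument_position : Int × Int) (markers : List (String × List String)) (whitespace : Bool) (out : String) : Decidable (Spec_insert_marker text type trigger_position argument_position markers whitespace out) := by unfold Spec_insert_marker; infer_instance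

-- ===== CLAIM (what is proved, stated in full; the proofs are below) =====
def Claim_equal_insert_marker : Prop := ∀ (text : String) (type : String) (trigger_position : Int × Int) (argument_position : Int × Int) (markers : List (String × List String)) (whitespace : Bool), Dom_insert_marker text type trigger_position argument_position markers whitespace → Pre_insert_marker text type trigger_position argument_position markers whitespace → Spec_insert_marker text type trigger_position argument_position markers whitespace (insert_marker text type trigger_position argument_position markers whitespace)

-- ===== LEMMAS AND PROOFS =====

-- open-marker string emitted before the char at index i (A's first two conditionals)
def pvO (t0 a0 : Int) (mt0 ma0 sp : List Char) (i : Int) : List Char :=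
  (if i = t0 then mt0 ++ sp else []) ++ (if i = a0 then ma0 ++ sp else [])

-- close-marker string emitted after the char at index i (A's last two conditionals)
def pvC (t1 a1 : Int) (mt1 ma1 sp : List Char) (i : Int) : List Char :=
  (if i = t1 - 1 then sp ++ mt1 else []) ++ (if i = a1 - 1 then sp ++ ma1 else [])

-- what A's loop emits for the suffix cs of the text starting at index s
def pvBodyA (t0 a0 t1 a1 : Int) (mt0 ma0 mt1 ma1 sp : List Char) : List Char → Int → List Char
  | [], _ => []
  | c :: cs, s =>
      pvO t0 a0 mt0 ma0 sp s ++ [c] ++ pvC t1 a1 mt1 ma1 sp s ++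
        pvBodyA t0 a0 t1 a1 mt0 ma0 mt1 ma1 sp cs (s + 1)

lemma pvStepA_eq (t0 a0 t1 a1 : Int) (mt0 ma0 mt1 ma1 sp : List Char) (acc : List Char)
    (i : Int) (c : Char) :
    pvStepA t0 a0 t1 a1 mt0 ma0 mt1 ma1 sp acc (i, c)
      = acc ++ pvO t0 a0 mt0 ma0 sp i ++ [c] ++ pvC t1 a1 mt1 ma1 sp i := by
  simp only [pvStepA, pvO, pvC]
  split_ifs <;> simp

lemma foldl_enumerate_eq_bodyA (t0 a0 t1 a1 : Int) (mt0 ma0 mt1 ma1 sp : List Char) :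
    ∀ (cs : List Char) (s : Int) (acc : List Char),
      (PySem.List.enumerate cs s).foldl (pvStepA t0 a0 t1 a1 mt0 ma0 mt1 ma1 sp) acc
        = acc ++ pvBodyA t0 a0 t1 a1 mt0 ma0 mt1 ma1 sp cs s := by
  intro cs
  induction cs with
  | nil => intro s acc; simp [PySem.List.enumerate_nil, pvBodyA]
  | cons c cs ih =>
      intro s acc
      rw [PySem.List.enumerate_cons, List.foldl_cons, ih, pvStepA_eq]
      simp [pvBodyA]

lemma foldl_if_single (q : Prop) [Decidable q] (x g : Int) (s a : List Char) :
    List.foldl (fun a (p : Int × List Char) => if p.1 = g then a ++ p.2 else a) a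
        (if q then [(x, s)] else [])
      = if q ∧ x = g then a ++ s else a := by
  split_ifs with h1 h2 <;> simp_all

-- the string B inserts at gap g (0 ≤ g ≤ n): close markers of char g-1, then open markers of char g
lemma pvPoints_foldl (t0 a0 t1 a1 : Int) (mt0 ma0 mt1 ma1 sp : List Char) (n g : Int)
    (h0 : 0 ≤ g) (hn : g ≤ n) (a : List Char) :
    List.foldl (fun a (p : Int × List Char) => if p.1 = g then a ++ p.2 else a) a
        (pvPoints t0 a0 t1 a1 mt0 ma0 mt1 ma1 sp n)
      = a ++ (if 1 ≤ g then pvC t1 a1 mt1 ma1 sp (g - 1) else []) ++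
          (if g < n then pvO t0 a0 mt0 ma0 sp g else []) := by
  simp only [pvPoints, List.foldl_append, foldl_if_single, pvC, pvO]
  split_ifs <;> first
    | (exfalso; omega)
    | simp [List.append_assoc]

lemma foldl_pyRange_eq_bodyA (t0 a0 t1 a1 : Int) (mt0 ma0 mt1 ma1 sp : List Char)
    (cs : List Char) :
    ∀ (m : Nat) (k : Int) (acc : List Char), 0 ≤ k → k + (m : Int) = (cs.length : Int) →
      (PySem.List.pyRange k ((cs.length : Int) + 1) 1).foldl
          (pvStepB (cs.length : Int)
            (pvPoints t0 a0 t1 a1 mt0 ma0 mt1 ma1 sp (cs.length : Int)) cs) acc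
        = acc ++ (if 1 ≤ k then pvC t1 a1 mt1 ma1 sp (k - 1) else []) ++
            pvBodyA t0 a0 t1 a1 mt0 ma0 mt1 ma1 sp (cs.drop k.toNat) k := by
  intro m
  induction m with
  | zero =>
      intro k acc hk hkn
      have hk' : k = (cs.length : Int) := by omega
      subst hk'
      rw [PySem.List.pyRange_one_singleton, List.foldl_cons, List.foldl_nil]
      simp only [pvStepB]
      rw [pvPoints_foldl _ _ _ _ _ _ _ _ _ _ _ (by omega) (by omega)]
      simp [pvBodyA]
  | succ m ih =>
      intro k acc hk hkn
      have hklt : k < (cs.length : Int) := by omega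
      rw [PySem.List.pyRange_one_cons (by omega), List.foldl_cons]
      have hknat : k.toNat < cs.length := by omega
      have hstep : pvStepB (cs.length : Int)
          (pvPoints t0 a0 t1 a1 mt0 ma0 mt1 ma1 sp (cs.length : Int)) cs acc k
          = acc ++ (if 1 ≤ k then pvC t1 a1 mt1 ma1 sp (k - 1) else []) ++
              pvO t0 a0 mt0 ma0 sp k ++ [cs[k.toNat]] := by
        simp only [pvStepB]
        rw [pvPoints_foldl _ _ _ _ _ _ _ _ _ _ _ hk (by omega)]
        rw [PySem.List.pyGetD_eq_getElem (xs := cs) (i := k) (d := ' ') hk (by exact_mod_cast hklt)]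
        simp [hklt, List.append_assoc]
      rw [hstep, ih (k + 1) _ (by omega) (by omega)]
      have hdrop : cs.drop k.toNat = cs[k.toNat] :: cs.drop (k.toNat + 1) :=
        List.drop_eq_getElem_cons hknat
      have htn : (k + 1).toNat = k.toNat + 1 := by omega
      rw [htn, hdrop]
      simp [pvBodyA, List.append_assoc]
      intro h; exfalso; omega

theorem ports_eq (text : String) (type : String) (trigger_position : Int × Int)
    (argument_position : Int × Int) (markers : List (String × List String))
    (whitespace : Bool) :
    insert_marker text type trigger_position argument_position markers whitespace
      = insert_marker_alt text type trigger_position argument_position markers whitespace := by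
  simp only [insert_marker, insert_marker_alt]
  rw [foldl_enumerate_eq_bodyA,
    foldl_pyRange_eq_bodyA _ _ _ _ _ _ _ _ _ _ text.toList.length 0 [] (by omega) (by omega)]
  simp

-- ===== VERDICT (by name: the statement is the Claim_ definition above) =====
theorem insert_marker_spec : Claim_equal_insert_marker := by
  intro text type tp ap markers ws _ _
  unfold Spec_insert_marker
  exact ports_eq text type tp ap markers ws
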